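-- pv_equiv track=rewrite | github.com/ranhli/edit-difference | app.py | find_shared_prefix_pairs
-- ===== SOURCE A (Python) =====
-- def find_shared_prefix_pairs(list1, list2):
--     list1_indexes = []
--     list2_indexes = []
--     prefix_lengths = []
--     max_j = 0
--
--     for i, str1 in enumerate(list1):
--         for j, str2 in enumerate(list2):
--             prefix_length = 0
--             min_length = min(len(str1), len(str2))
--
--             while (
--                 prefix_length < min_length
--                 and str1[prefix_length].lower() == str2[prefix_length].lower()
--             ):
--                 prefix_length += 1
--
--             if prefix_length > 1 and j >= max_j:
--                 list1_indexes.append(i)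
--                 list2_indexes.append(j)
--                 max_j = j
--                 prefix_lengths.append(prefix_length)
--
--     return list1_indexes, list2_indexes, prefix_lengths
-- ===== SOURCE B (Python) =====
-- def find_shared_prefix_pairs(list1, list2):
--     # Bucket list2 by lowercased 2-char prefix; scan only candidates sharing it.
--     low2 = [s.lower() for s in list2]
--     buckets = {}
--     for j, s in enumerate(low2):
--         if len(s) >= 2:
--             buckets.setdefault(s[:2], []).append((j, s))
--
--     list1_indexes = []
--     list2_indexes = []
--     prefix_lengths = []
--     max_j = 0
--     for i, s1 in enumerate(list1):
--         t1 = s1.lower()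
--         if len(t1) < 2:
--             continue
--         for j, t2 in buckets.get(t1[:2], []):
--             if j >= max_j:
--                 k = 2
--                 m = min(len(t1), len(t2))
--                 while k < m and t1[k] == t2[k]:
--                     k += 1
--                 list1_indexes.append(i)
--                 list2_indexes.append(j)
--                 max_j = j
--                 prefix_lengths.append(k)
--     return list1_indexes, list2_indexes, prefix_lengths
-- ===== Notes on version B (the rewrite author's own statement) =====
-- stated objective: faster
-- what changed: B lowercases every string once and builds a dict bucketing list2 indices by their lowercased 2-char prefix, so each list1 element only scans candidates that already share a 2-character prefix (and starts the prefix count at 2), instead of A's char-by-char comparison of every (i,j) pair with per-char .lower() calls.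
import Mathlib
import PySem

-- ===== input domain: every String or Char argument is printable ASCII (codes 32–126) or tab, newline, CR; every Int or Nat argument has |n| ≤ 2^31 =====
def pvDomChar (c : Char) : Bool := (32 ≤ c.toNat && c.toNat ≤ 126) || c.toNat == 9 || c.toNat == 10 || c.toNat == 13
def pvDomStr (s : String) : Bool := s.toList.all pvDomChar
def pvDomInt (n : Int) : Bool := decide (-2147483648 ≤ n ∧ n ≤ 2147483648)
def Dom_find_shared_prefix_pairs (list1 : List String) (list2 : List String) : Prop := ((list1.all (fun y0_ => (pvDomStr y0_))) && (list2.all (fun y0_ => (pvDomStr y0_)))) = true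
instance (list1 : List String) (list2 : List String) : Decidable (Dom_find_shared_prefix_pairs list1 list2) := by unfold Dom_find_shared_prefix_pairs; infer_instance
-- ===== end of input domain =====

-- B buckets list2 once by lowercased 2-char prefix and scans only matching candidates
-- (objective: faster by a constant factor on typical data; return value identical).

-- ===== PORT A =====

-- the while loop of A: count leading positions where the 1-char lowercased strings are equal
def pvPrefA : List Char → List Char → Nat
  | c :: cs, d :: ds =>
      if PySem.Chars.lower [c] = PySem.Chars.lower [d] then pvPrefA cs ds + 1 else 0
  | _, _ => 0

def find_shared_prefix_pairs (list1 : List String) (list2 : List String) : List Int × List Int × List Int :=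
  let st := (PySem.List.enumerate list1).foldl (fun st p =>
      (PySem.List.enumerate list2).foldl (fun st q =>
        let k := pvPrefA p.2.toList q.2.toList
        if 1 < k ∧ st.2.2.2 ≤ q.1 then
          (st.1 ++ [p.1], st.2.1 ++ [q.1], st.2.2.1 ++ [(k : Int)], q.1)
        else st) st)
    (([] : List Int), ([] : List Int), ([] : List Int), (0 : Int))
  (st.1, st.2.1, st.2.2.1)

-- ===== PORT B =====

-- B's inner while loop (on already-lowercased strings): count leading equal chars
def pvPrefB : List Char → List Char → Nat
  | c :: cs, d :: ds => if c = d then pvPrefB cs ds + 1 else 0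
  | _, _ => 0

-- buckets: lowercased 2-char prefix ↦ list of (j, lowered string), in j order
def pvBuckets (low2 : List (List Char)) : PySem.Dict (List Char) (List (Int × List Char)) :=
  (PySem.List.enumerate low2).foldl (fun d q =>
    if 2 ≤ q.2.length then d.modify (q.2.take 2) [] (· ++ [q]) else d) PySem.Dict.empty

def find_shared_prefix_pairs_alt (list1 : List String) (list2 : List String) : List Int × List Int × List Int :=
  let low2 := list2.map (fun s => PySem.Chars.lower s.toList)
  let buckets := pvBuckets low2
  let st := (PySem.List.enumerate list1).foldl (fun st p =>
      let t1 := PySem.Chars.lower p.2.toList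
      if t1.length < 2 then st
      else (buckets.getD (t1.take 2) []).foldl (fun st q =>
        if st.2.2.2 ≤ q.1 then
          let k := 2 + pvPrefB (t1.drop 2) (q.2.drop 2)
          (st.1 ++ [p.1], st.2.1 ++ [q.1], st.2.2.1 ++ [(k : Int)], q.1)
        else st) st)
    (([] : List Int), ([] : List Int), ([] : List Int), (0 : Int))
  (st.1, st.2.1, st.2.2.1)

-- ===== PRECONDITION & SPEC =====
def Spec_find_shared_prefix_pairs (list1 : List String) (list2 : List String) (out : List Int × List Int × List Int) : Prop := out = find_shared_prefix_pairs_alt list1 list2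
instance (list1 : List String) (list2 : List String) (out : List Int × List Int × List Int) : Decidable (Spec_find_shared_prefix_pairs list1 list2 out) := by unfold Spec_find_shared_prefix_pairs; infer_instance

-- ===== CLAIM (what is proved, stated in full; the proofs are below) =====
def Claim_equal_find_shared_prefix_pairs : Prop := ∀ (list1 : List String) (list2 : List String), Dom_find_shared_prefix_pairs list1 list2 → Spec_find_shared_prefix_pairs list1 list2 (find_shared_prefix_pairs list1 list2)

-- ===== LEMMAS AND PROOFS =====

-- pvPrefA is pvPrefB on the lowercased strings
theorem pvPrefA_eq_prefB_lower (s t : List Char) :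
    pvPrefA s t = pvPrefB (PySem.Chars.lower s) (PySem.Chars.lower t) := by
  induction s generalizing t with
  | nil => cases t <;> simp [pvPrefA, pvPrefB, PySem.Chars.lower]
  | cons c cs ih =>
    cases t with
    | nil => simp [pvPrefA, pvPrefB, PySem.Chars.lower]
    | cons d ds => simp [pvPrefA, pvPrefB, PySem.Chars.lower, ih]

theorem pvPrefB_gt_one_iff (u v : List Char) :
    1 < pvPrefB u v ↔ 2 ≤ u.length ∧ 2 ≤ v.length ∧ u.take 2 = v.take 2 := by
  match u, v with
  | [], _ => simp [pvPrefB]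
  | _ :: _, [] => simp [pvPrefB]
  | [a], b :: bs =>
    cases bs <;> simp [pvPrefB] <;> split <;> simp
  | a :: a' :: as, [b] =>
    simp [pvPrefB]; split <;> simp
  | a :: a' :: as, b :: b' :: bs =>
    simp [pvPrefB]
    split_ifs <;> simp_all

theorem pvPrefB_split2 (u v : List Char) (hu : 2 ≤ u.length) (hv : 2 ≤ v.length)
    (h : u.take 2 = v.take 2) :
    pvPrefB u v = 2 + pvPrefB (u.drop 2) (v.drop 2) := by
  match u, v with
  | a :: a' :: as, b :: b' :: bs =>
    simp at h
    obtain ⟨h1, h2⟩ := h; subst h1; subst h2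
    simp [pvPrefB]; omega

-- generic loop-shape fact for B: a fold whose step ignores non-p elements and acts
-- through h on p elements equals the fold over the filtered, mapped list
theorem pv_foldl_filter_map {α β γ : Type} (p : α → Bool) (h : α → γ)
    (f : β → α → β) (g : β → γ → β) (l : List α) (init : β)
    (h1 : ∀ st x, x ∈ l → p x = false → f st x = st)
    (h2 : ∀ st x, x ∈ l → p x = true → f st x = g st (h x)) :
    l.foldl f init = ((l.filter p).map h).foldl g init := by
  induction l generalizing init with
  | nil => simp
  | cons x xs ih =>
    by_cases hp : p x
    · simp only [List.foldl_cons, List.filter_cons_of_pos hp, List.map_cons]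
      rw [h2 init x (by simp) hp]
      exact ih (g init (h x)) (fun st y hy => h1 st y (by simp [hy]))
        (fun st y hy => h2 st y (by simp [hy]))
    · simp only [List.foldl_cons, List.filter_cons_of_neg (by simpa using hp)]
      rw [h1 init x (by simp) (by simpa using hp)]
      exact ih init (fun st y hy => h1 st y (by simp [hy]))
        (fun st y hy => h2 st y (by simp [hy]))

theorem pv_enumerate_map {α γ : Type} (g : α → γ) (l : List α) (s : Int) :
    PySem.List.enumerate (l.map g) s = (PySem.List.enumerate l s).map (fun q => (q.1, g q.2)) := by
  induction l generalizing s with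
  | nil => simp [PySem.List.enumerate]
  | cons x xs ih => simp [PySem.List.enumerate, ih]

-- the bucket for a key holds exactly the (j, lowered) pairs whose lowered string
-- has length ≥ 2 and starts with that key, in order
theorem pvBuckets_getD (low2 : List (List Char)) (key : List Char) :
    (pvBuckets low2).getD key []
      = (PySem.List.enumerate low2).filter
          (fun q => decide (2 ≤ q.2.length) && (q.2.take 2 == key)) := by
  unfold pvBuckets
  rw [pv_foldl_filter_map (fun q => decide (2 ≤ q.2.length))
        (fun q => ((q.2.take 2 : List Char), q))
        _ (fun d p => d.modify p.1 [] (· ++ [p.2]))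
        (PySem.List.enumerate low2) PySem.Dict.empty
        (by intro st x _ hx; simp at hx; simp [hx])
        (by intro st x _ hx; simp at hx; simp [hx])]
  rw [PySem.Dict.getD_foldl_modify_append]
  simp only [List.filter_map, List.map_map]
  rw [show ((fun x => x.2) ∘ fun q : Int × List Char => ((List.take 2 q.2 : List Char), q)) = id from rfl, List.map_id]
  simp only [PySem.Dict.getD_empty, List.nil_append, List.filter_filter]
  apply List.filter_congr
  intro x _
  simp [Function.comp, Bool.and_comm]

theorem pv_foldl_id {α β : Type} (f : β → α → β) (l : List α) (init : β)
    (h : ∀ st x, x ∈ l → f st x = st) : l.foldl f init = init := by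
  induction l generalizing init with
  | nil => rfl
  | cons x xs ih =>
    rw [List.foldl_cons, h init x (by simp)]
    exact ih init (fun st y hy => h st y (by simp [hy]))

-- for a string whose lowered form has length ≥ 2, A's scan of all of list2 equals
-- B's scan of the bucket of its lowered 2-char prefix
theorem pv_inner (list2 : List String) (i : Int) (s1 : String)
    (h2 : 2 ≤ (PySem.Chars.lower s1.toList).length)
    (st : List Int × List Int × List Int × Int) :
    (PySem.List.enumerate list2).foldl (fun st q =>
        if 1 < pvPrefA s1.toList q.2.toList ∧ st.2.2.2 ≤ q.1 then
          (st.1 ++ [i], st.2.1 ++ [q.1], st.2.2.1 ++ [((pvPrefA s1.toList q.2.toList : Nat) : Int)], q.1)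
        else st) st
    = ((pvBuckets (list2.map (fun s => PySem.Chars.lower s.toList))).getD
          ((PySem.Chars.lower s1.toList).take 2) []).foldl (fun st q =>
        if st.2.2.2 ≤ q.1 then
          (st.1 ++ [i], st.2.1 ++ [q.1],
           st.2.2.1 ++ [((2 + pvPrefB ((PySem.Chars.lower s1.toList).drop 2) (q.2.drop 2) : Nat) : Int)], q.1)
        else st) st := by
  rw [pvBuckets_getD, pv_enumerate_map, List.filter_map]
  apply pv_foldl_filter_map
  · intro st x _ hx
    simp only [Function.comp_apply, Bool.and_eq_false_iff, beq_eq_false_iff_ne, ne_eq,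
      decide_eq_false_iff_not, not_le] at hx
    rw [if_neg]
    rintro ⟨hk, -⟩
    rw [pvPrefA_eq_prefB_lower, pvPrefB_gt_one_iff] at hk
    obtain ⟨hk1, hk2, hk3⟩ := hk
    rcases hx with hx | hx
    · omega
    · exact hx hk3.symm
  · intro st x _ hx
    simp only [Function.comp_apply, Bool.and_eq_true, beq_iff_eq, decide_eq_true_eq] at hx
    have hk : pvPrefA s1.toList x.2.toList
        = 2 + pvPrefB ((PySem.Chars.lower s1.toList).drop 2) ((PySem.Chars.lower x.2.toList).drop 2) := by
      rw [pvPrefA_eq_prefB_lower,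
        pvPrefB_split2 _ _ h2 hx.1 hx.2.symm]
    rw [hk]
    by_cases hj : st.2.2.2 ≤ x.1
    · rw [if_pos ⟨by omega, hj⟩, if_pos hj]
    · rw [if_neg (by tauto), if_neg hj]

-- ===== VERDICT (by name: the statement is the Claim_ definition above) =====
theorem find_shared_prefix_pairs_spec : Claim_equal_find_shared_prefix_pairs := by
  intro list1 list2 _
  unfold Spec_find_shared_prefix_pairs
  simp only [find_shared_prefix_pairs, find_shared_prefix_pairs_alt]
  apply congrArg (fun st : List Int × List Int × List Int × Int => (st.1, st.2.1, st.2.2.1))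
  apply PySem.List.foldl_congr_mem
  intro acc p _
  by_cases hlen : (PySem.Chars.lower p.2.toList).length < 2
  · rw [if_pos hlen]
    apply pv_foldl_id
    intro st q _
    rw [if_neg]
    rintro ⟨hk, -⟩
    rw [pvPrefA_eq_prefB_lower, pvPrefB_gt_one_iff] at hk
    omega
  · rw [if_neg hlen]
    exact pv_inner list2 p.1 p.2 (by omega) acc
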